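-- pv_equiv track=rewrite | github.com/SK-Rookies-Module-2/Vuln-Inspector | plugins/remote/kisa_u33/main.py | _is_suspicious_path
-- ===== SOURCE A (Python) =====
-- from typing import Dict, List, Optional, Sequence
--
-- def _is_suspicious_path(path: str, suspicious_paths: Sequence[str]) -> bool:
--     for base in suspicious_paths:
--         base = str(base).strip()
--         if not base:
--             continue
--         base = base.rstrip("/")
--         if path == base:
--             return True
--         if path.startswith(f"{base}/"):
--             return True
--     return False
-- ===== SOURCE B (Python) =====
-- def _is_suspicious_path(path, suspicious_paths):
--     bases = set()
--     for b in suspicious_paths: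
--         b = str(b).strip()
--         if not b:
--             continue
--         bases.add(b.rstrip("/"))
--     if path in bases:
--         return True
--     for i in range(len(path)):
--         if path[i] == "/" and path[:i] in bases:
--             return True
--     return False
-- ===== Notes on version B (the rewrite author's own statement) =====
-- stated objective: alternative
-- what changed: Builds a set of normalized bases once, then tests the path and its slash-aligned prefixes against that set, instead of comparing the path against every candidate with startswith.
import Mathlib
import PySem

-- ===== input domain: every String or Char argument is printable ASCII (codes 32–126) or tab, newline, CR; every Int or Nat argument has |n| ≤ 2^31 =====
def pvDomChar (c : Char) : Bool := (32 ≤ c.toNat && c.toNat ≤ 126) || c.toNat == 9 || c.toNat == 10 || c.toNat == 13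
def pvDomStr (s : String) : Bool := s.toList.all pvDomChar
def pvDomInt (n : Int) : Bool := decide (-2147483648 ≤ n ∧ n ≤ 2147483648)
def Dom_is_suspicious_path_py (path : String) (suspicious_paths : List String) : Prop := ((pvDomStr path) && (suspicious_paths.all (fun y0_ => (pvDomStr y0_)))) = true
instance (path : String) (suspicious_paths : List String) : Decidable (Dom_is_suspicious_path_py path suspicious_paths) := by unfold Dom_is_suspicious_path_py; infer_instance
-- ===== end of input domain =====

-- B replaces the per-candidate startswith scan by a set of normalized bases looked
-- up at the path itself and at each slash-aligned prefix of the path (objective: alternative algorithm).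

-- exact port of Python's str.rstrip("/"): drop trailing '/' characters (used by both sources)
def pvRstripSlash (s : String) : String :=
  String.ofList ((s.toList.reverse.dropWhile (fun c => c == '/')).reverse)

-- ===== PORT A =====
def is_suspicious_path_py (path : String) (suspicious_paths : List String) : Bool :=
  match suspicious_paths with
  | [] => false
  | base :: rest =>
    let b := PySem.Str.strip base          -- str(base).strip(); str() is identity on str
    if b = "" then is_suspicious_path_py path rest
    else
      let b2 := pvRstripSlash b
      if path = b2 then true
      else if PySem.Str.startswith path (b2 ++ "/") then true
      else is_suspicious_path_py path rest

-- ===== PORT B =====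
def pvNormBases (suspicious_paths : List String) : PySem.Set String :=
  suspicious_paths.foldl (fun S b =>
    let b' := PySem.Str.strip b            -- str(b).strip()
    if b' = "" then S else PySem.Set.add S (pvRstripSlash b')) PySem.Set.empty

def is_suspicious_path_py_alt (path : String) (suspicious_paths : List String) : Bool :=
  let bases := pvNormBases suspicious_paths
  if PySem.Set.contains bases path then true
  else
    -- for i in range(len(path)): path[i] == '/' and path[:i] in bases
    -- (0 ≤ i < len(path), so path[i] = toList[i]? and path[:i] = take i, exact)
    (List.range path.toList.length).any (fun i =>
      path.toList[i]? == some '/' && PySem.Set.contains bases (String.ofList (path.toList.take i)))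

-- ===== PRECONDITION & SPEC =====
def Spec_is_suspicious_path_py (path : String) (suspicious_paths : List String) (out : Bool) : Prop := out = is_suspicious_path_py_alt path suspicious_paths
instance (path : String) (suspicious_paths : List String) (out : Bool) : Decidable (Spec_is_suspicious_path_py path suspicious_paths out) := by unfold Spec_is_suspicious_path_py; infer_instance

-- ===== CLAIM (what is proved, stated in full; the proofs are below) =====
def Claim_equal_is_suspicious_path_py : Prop := ∀ (path : String) (suspicious_paths : List String), Dom_is_suspicious_path_py path suspicious_paths → Spec_is_suspicious_path_py path suspicious_paths (is_suspicious_path_py path suspicious_paths)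

-- ===== LEMMAS AND PROOFS =====

-- the common "path matches normalized base b2" proposition
def pvMatch (path b2 : String) : Prop :=
  path = b2 ∨ ∃ i, path.toList[i]? = some '/' ∧ path.toList.take i = b2.toList

-- (p ++ [c]) is a prefix of l iff l has p at the front and c right after it
theorem pv_prefix_append_single {l p : List Char} {c : Char} :
    (p ++ [c]) <+: l ↔ l[p.length]? = some c ∧ l.take p.length = p := by
  constructor
  · rintro ⟨t, rfl⟩
    refine ⟨?_, ?_⟩
    · simp
    · simp
  · rintro ⟨h1, h2⟩
    have hlt : p.length < l.length := by
      have := List.getElem?_eq_some_iff.mp h1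
      exact this.1
    refine ⟨l.drop (p.length + 1), ?_⟩
    have : l.take (p.length + 1) = p ++ [c] := by
      rw [List.take_add_one, h1, h2]; rfl
    calc p ++ [c] ++ l.drop (p.length + 1)
        = l.take (p.length + 1) ++ l.drop (p.length + 1) := by rw [this]
      _ = l := List.take_append_drop _ _

-- startswith path (b2 ++ "/") expressed via slash positions of path
theorem pv_startswith_iff (path b2 : String) :
    PySem.Str.startswith path (b2 ++ "/") = true ↔
      ∃ i, path.toList[i]? = some '/' ∧ path.toList.take i = b2.toList := by
  rw [PySem.Str.startswith_eq, PySem.Chars.startswith_iff]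
  have htl : (b2 ++ "/").toList = b2.toList ++ ['/'] := by simp
  rw [htl, pv_prefix_append_single]
  constructor
  · rintro ⟨h1, h2⟩
    exact ⟨b2.toList.length, h1, h2⟩
  · rintro ⟨i, h1, h2⟩
    have hi : i = b2.toList.length := by
      have hlt : i < path.toList.length := (List.getElem?_eq_some_iff.mp h1).1
      have h := congrArg List.length h2
      rw [List.length_take] at h
      omega
    subst hi
    exact ⟨h1, h2⟩

-- characterization of port A
theorem pvA_iff (path : String) (sps : List String) :
    is_suspicious_path_py path sps = true ↔
      ∃ b ∈ sps, PySem.Str.strip b ≠ "" ∧ pvMatch path (pvRstripSlash (PySem.Str.strip b)) := by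
  induction sps with
  | nil => simp [is_suspicious_path_py]
  | cons base rest ih =>
    rw [is_suspicious_path_py]
    by_cases hb : PySem.Str.strip base = ""
    · simp only [hb, reduceIte, ih]
      constructor
      · rintro ⟨b, hmem, h⟩; exact ⟨b, List.mem_cons_of_mem _ hmem, h⟩
      · rintro ⟨b, hmem, h⟩
        rcases List.mem_cons.mp hmem with rfl | hmem
        · exact absurd hb h.1
        · exact ⟨b, hmem, h⟩
    · simp only [hb, reduceIte]
      by_cases h1 : path = pvRstripSlash (PySem.Str.strip base)
      · rw [if_pos h1]
        exact iff_of_true rfl ⟨base, List.mem_cons_self, hb, Or.inl h1⟩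
      · rw [if_neg h1]
        by_cases h2 : PySem.Str.startswith path (pvRstripSlash (PySem.Str.strip base) ++ "/") = true
        · rw [if_pos h2]
          exact iff_of_true rfl ⟨base, List.mem_cons_self, hb, Or.inr ((pv_startswith_iff _ _).mp h2)⟩
        · rw [if_neg h2, ih]
          constructor
          · rintro ⟨b, hmem, h⟩; exact ⟨b, List.mem_cons_of_mem _ hmem, h⟩
          · rintro ⟨b, hmem, hne, hm⟩
            rcases List.mem_cons.mp hmem with rfl | hmem
            · rcases hm with hm | hm
              · exact absurd hm h1
              · exact absurd ((pv_startswith_iff _ _).mpr hm) h2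
            · exact ⟨b, hmem, hne, hm⟩

-- membership in the normalized-base set
theorem pv_mem_normBases (sps : List String) (x : String) :
    x ∈ pvNormBases sps ↔ ∃ b ∈ sps, PySem.Str.strip b ≠ "" ∧ x = pvRstripSlash (PySem.Str.strip b) := by
  unfold pvNormBases
  suffices h : ∀ (acc : PySem.Set String),
      x ∈ sps.foldl (fun S b =>
        let b' := PySem.Str.strip b
        if b' = "" then S else PySem.Set.add S (pvRstripSlash b')) acc ↔
      x ∈ acc ∨ ∃ b ∈ sps, PySem.Str.strip b ≠ "" ∧ x = pvRstripSlash (PySem.Str.strip b) by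
    rw [h PySem.Set.empty]
    simp [PySem.Set.empty]
  induction sps with
  | nil => intro acc; simp
  | cons base rest ih =>
    intro acc
    simp only [List.foldl_cons]
    by_cases hb : PySem.Str.strip base = ""
    · rw [show (let b' := PySem.Str.strip base;
          if b' = "" then acc else PySem.Set.add acc (pvRstripSlash b')) = acc by simp [hb]]
      rw [ih acc]
      constructor
      · rintro (h | ⟨b, hmem, h⟩)
        · exact Or.inl h
        · exact Or.inr ⟨b, List.mem_cons_of_mem _ hmem, h⟩
      · rintro (h | ⟨b, hmem, h⟩)
        · exact Or.inl h
        · rcases List.mem_cons.mp hmem with rfl | hmem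
          · exact absurd hb h.1
          · exact Or.inr ⟨b, hmem, h⟩
    · rw [show (let b' := PySem.Str.strip base;
          if b' = "" then acc else PySem.Set.add acc (pvRstripSlash b'))
          = PySem.Set.add acc (pvRstripSlash (PySem.Str.strip base)) by simp [hb]]
      rw [ih _, PySem.Set.mem_add]
      constructor
      · rintro ((h | h) | ⟨b, hmem, h⟩)
        · exact Or.inl h
        · exact Or.inr ⟨base, List.mem_cons_self, hb, h⟩
        · exact Or.inr ⟨b, List.mem_cons_of_mem _ hmem, h⟩
      · rintro (h | ⟨b, hmem, h⟩)
        · exact Or.inl (Or.inl h)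
        · rcases List.mem_cons.mp hmem with rfl | hmem
          · exact Or.inl (Or.inr h.2)
          · exact Or.inr ⟨b, hmem, h⟩

-- characterization of port B
theorem pvB_iff (path : String) (sps : List String) :
    is_suspicious_path_py_alt path sps = true ↔
      ∃ b ∈ sps, PySem.Str.strip b ≠ "" ∧ pvMatch path (pvRstripSlash (PySem.Str.strip b)) := by
  simp only [is_suspicious_path_py_alt]
  by_cases hc : PySem.Set.contains (pvNormBases sps) path = true
  · rw [if_pos hc]
    rcases (pv_mem_normBases sps path).mp ((PySem.Set.contains_iff _ _).mp hc) with ⟨b, hmem, hne, hx⟩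
    exact iff_of_true rfl ⟨b, hmem, hne, Or.inl hx⟩
  · rw [if_neg hc, List.any_eq_true]
    constructor
    · rintro ⟨i, hi, hf⟩
      rw [Bool.and_eq_true, beq_iff_eq] at hf
      rcases (pv_mem_normBases sps _).mp ((PySem.Set.contains_iff _ _).mp hf.2) with ⟨b, hmem, hne, hx⟩
      refine ⟨b, hmem, hne, Or.inr ⟨i, hf.1, ?_⟩⟩
      rw [← hx, String.toList_ofList]
    · rintro ⟨b, hmem, hne, hm⟩
      rcases hm with hm | ⟨i, h1, h2⟩
      · exact absurd ((PySem.Set.contains_iff _ _).mpr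
          ((pv_mem_normBases sps path).mpr ⟨b, hmem, hne, hm⟩)) hc
      · refine ⟨i, List.mem_range.mpr (List.getElem?_eq_some_iff.mp h1).1, ?_⟩
        rw [Bool.and_eq_true, beq_iff_eq]
        refine ⟨h1, (PySem.Set.contains_iff _ _).mpr ((pv_mem_normBases sps _).mpr
          ⟨b, hmem, hne, ?_⟩)⟩
        apply String.ext_iff.mpr
        rw [String.toList_ofList, h2]

-- ===== VERDICT (by name: the statement is the Claim_ definition above) =====
theorem is_suspicious_path_py_spec : Claim_equal_is_suspicious_path_py := by
  intro path sps _
  unfold Spec_is_suspicious_path_py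
  by_cases h : is_suspicious_path_py path sps = true
  · rw [h, Eq.comm, pvB_iff, ← pvA_iff]; exact h
  · have hA : is_suspicious_path_py path sps = false := Bool.eq_false_iff.mpr h
    have hB : is_suspicious_path_py_alt path sps = false := by
      apply Bool.eq_false_iff.mpr
      intro hB
      exact h ((pvA_iff _ _).mpr ((pvB_iff _ _).mp hB))
    rw [hA, hB]
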